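-- pv_equiv track=rewrite | github.com/spacemiqote/JPEGGING | lib.py | acDe
-- ===== SOURCE A (Python) =====
-- def bits_gen(CS):
--     for bit in CS:
--         yield bit
--
-- def from_1comp(binary):
--     if binary == '':
--         return 0
--     elif binary == '0':
--         return -1
--     return -int(''.join('1' if bit == '0' else '0' for bit in binary), 2) if binary[0] == '0' else int(binary, 2)
--
-- def acDe(acHTd, CS_layers):
--     decoded_data_layers = []
--     for CS in CS_layers:
--         gen = bits_gen(CS)
--         bit_string = ""
--         decoded_data = []
--         while True:
--             try:
--                 bit_string += next(gen)
--             except StopIteration: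
--                 break
--             if bit_string in acHTd:
--                 run_length_category = acHTd[bit_string]
--                 run_length = run_length_category // 16
--                 category = run_length_category % 16
--                 bit_string = ""
--                 additional_bits = ''.join(next(gen) for _ in range(category))
--                 if additional_bits != '':
--                     decoded_number = from_1comp(additional_bits)
--                     decoded_data.append((run_length, decoded_number))
--                 else:
--                     decoded_data.append((run_length, 0))
--         decoded_data_layers.append(decoded_data)
--     return decoded_data_layers
-- ===== SOURCE B (Python) =====
-- def from_1comp(binary):
--     if binary == '':
--         return 0
--     elif binary == '0':
--         return -1
--     return -int(''.join('1' if bit == '0' else '0' for bit in binary), 2) if binary[0] == '0' else int(binary, 2)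
--
-- def acDe(acHTd, CS_layers):
--     # Candidate-filtering decoder: instead of accumulating a bit_string and testing
--     # dict membership of the growing prefix, keep the list of table entries still
--     # compatible with the bits consumed since the last reset (as (key-suffix, value)
--     # pairs), advance each by one bit at a time, fire on the first entry whose
--     # suffix is exhausted, and stop a layer early when no entry can ever match.
--     table = [(tuple(k), v) for k, v in acHTd.items()]
--     out = []
--     for CS in CS_layers:
--         cands = table
--         decoded = []
--         i, n = 0, len(CS)
--         while i < n:
--             c = CS[i]
--             i += 1
--             cands = [(t[1:], v) for (t, v) in cands if t and t[0] == c]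
--             hit = next((v for (t, v) in cands if not t), None)
--             if hit is not None:
--                 run_length, category = divmod(hit, 16)
--                 bits = CS[i:i + category]
--                 i += category
--                 decoded.append((run_length, from_1comp(bits) if bits else 0))
--                 cands = table
--             elif not cands:
--                 break
--         out.append(decoded)
--     return out
-- ===== Notes on version B (the rewrite author's own statement) =====
-- stated objective: alternative
-- what changed: B replaces A's ever-growing bit_string accumulator with repeated dict-membership tests by a candidate-filtering decoder: it keeps the list of table entries (as key-suffix/value pairs) still compatible with the bits read since the last codeword, advances them one bit at a time, fires on the first exhausted suffix, and breaks a layer early as soon as no entry can ever match.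
import Mathlib
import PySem

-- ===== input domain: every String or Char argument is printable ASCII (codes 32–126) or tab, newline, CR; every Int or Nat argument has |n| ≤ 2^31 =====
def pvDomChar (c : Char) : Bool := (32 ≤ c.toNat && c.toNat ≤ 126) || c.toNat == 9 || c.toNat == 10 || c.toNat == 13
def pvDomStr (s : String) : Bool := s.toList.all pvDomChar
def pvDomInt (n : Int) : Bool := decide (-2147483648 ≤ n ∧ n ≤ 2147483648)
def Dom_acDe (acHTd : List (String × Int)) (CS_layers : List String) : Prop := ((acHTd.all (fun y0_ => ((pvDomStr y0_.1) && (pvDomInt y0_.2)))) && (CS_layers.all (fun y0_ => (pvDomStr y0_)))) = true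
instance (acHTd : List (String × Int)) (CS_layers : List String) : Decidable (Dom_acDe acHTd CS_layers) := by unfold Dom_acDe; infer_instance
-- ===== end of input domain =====

-- B replaces A's growing bit_string + dict-membership scan by a candidate-filtering decoder
-- with an early break on dead prefixes (objective: alternative; equality of RETURN values is proved).

-- ===== SHARED HELPERS (used by both ports and by Pre_) =====

-- Python whitespace characters relevant to int(s, 2) stripping
def pyWs (c : Char) : Bool :=
  c == ' ' || c == '\t' || c == '\n' || c == '\r' || c == '\x0b' || c == '\x0c'

-- binary digit sequence with single underscores BETWEEN digits (Python int literal rule); exact by hand-port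
def digitsVal2 : List Char → Int → Option Int
  | [], acc => some acc
  | '_' :: c :: t, acc =>
      if c == '0' || c == '1' then digitsVal2 t (2 * acc + (if c == '1' then 1 else 0)) else none
  | ['_'], _ => none
  | c :: t, acc =>
      if c == '0' || c == '1' then digitsVal2 t (2 * acc + (if c == '1' then 1 else 0)) else none

def parseDigits2 : List Char → Option Int
  | c :: t => if c == '0' || c == '1' then digitsVal2 t (if c == '1' then 1 else 0) else none
  | [] => none

-- hand-port of Python's int(s, 2): strip whitespace, optional sign, optional 0b/0B prefix
-- (underscore allowed right after the prefix), then binary digits; none exactly where Python raises ValueError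
def parseInt2? (s : List Char) : Option Int :=
  let l := ((s.dropWhile pyWs).reverse.dropWhile pyWs).reverse
  let sl : Int × List Char :=
    match l with
    | '+' :: t => (1, t)
    | '-' :: t => (-1, t)
    | _ => (1, l)
  let r : Option Int :=
    match sl.2 with
    | '0' :: 'b' :: t => (match t with | '_' :: t2 => parseDigits2 t2 | _ => parseDigits2 t)
    | '0' :: 'B' :: t => (match t with | '_' :: t2 => parseDigits2 t2 | _ => parseDigits2 t)
    | _ => parseDigits2 sl.2
  r.map (fun v => sl.1 * v)

-- port of from_1comp; none exactly where Python raises ValueError (the complement string in the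
-- first branch is always a nonempty pure binary string, so its parse succeeds and getD 0 is exact)
def from_1comp? (binary : List Char) : Option Int :=
  match binary with
  | [] => some 0
  | ['0'] => some (-1)
  | c :: _ =>
      if c == '0' then
        some (-(parseInt2? (binary.map (fun b => if b == '0' then '1' else '0'))).getD 0)
      else parseInt2? binary

-- ===== PORT A =====

-- the while-True loop of acDe over one CS layer: state = (remaining bits, bit_string, decoded_data).
-- Where the Python raises (RuntimeError on stream ending mid-additional-bits, ValueError in
-- from_1comp) the port stops the layer; those inputs are outside Pre_acDe.
def acDeLoop (d : PySem.Dict String Int) : List Char → List Char → List (Int × Int) → List (Int × Int)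
  | [], _, acc => acc
  | c :: rest, bs, acc =>
    let bs' := bs ++ [c]
    match (d.get? (String.ofList bs')) with
    | none => acDeLoop d rest bs' acc
    | some v =>
      let rl := PySem.Int.floordiv v 16
      let cat := (PySem.Int.mod v 16).toNat
      if rest.length < cat then acc          -- Python: RuntimeError (PEP 479); outside Pre_acDe
      else
        let ab := rest.take cat
        if ab.isEmpty then acDeLoop d (rest.drop cat) [] (acc ++ [(rl, 0)])
        else
          match from_1comp? ab with
          | none => acc                       -- Python: ValueError; outside Pre_acDe
          | some n => acDeLoop d (rest.drop cat) [] (acc ++ [(rl, n)])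
  termination_by cs => cs.length
  decreasing_by all_goals (simp [List.length_drop]; try omega)

def acDe (acHTd : List (String × Int)) (CS_layers : List String) : List (List (Int × Int)) :=
  CS_layers.foldl (fun out CS => out ++ [acDeLoop (PySem.Dict.mk acHTd) CS.toList [] []]) []

-- ===== PORT B =====

-- advance every still-compatible table entry (key suffix, value) by one bit
def stepCands (c : Char) (cands : List (List Char × Int)) : List (List Char × Int) :=
  cands.filterMap (fun tv =>
    match tv.1 with
    | h :: t => if h == c then some (t, tv.2) else none
    | [] => none)

-- first entry whose key is exhausted (Source B's next((v for (t, v) in cands if not t), None))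
def firstHit? (cands : List (List Char × Int)) : Option Int :=
  (cands.find? (fun tv => tv.1.isEmpty)).map (fun tv => tv.2)

def altLoop (table : List (List Char × Int)) : List Char → List (List Char × Int) → List (Int × Int) → List (Int × Int)
  | [], _, acc => acc
  | c :: rest, cands, acc =>
    let cands' := stepCands c cands
    match firstHit? cands' with
    | some v =>
      let rl := PySem.Int.floordiv v 16
      let cat := (PySem.Int.mod v 16).toNat
      if rest.length < cat then acc          -- Source B would decode the short slice here; these
                                             -- truncated streams are outside Pre_acDe (A raises)
      else
        let bits := rest.take cat
        match (if bits.isEmpty then some 0 else from_1comp? bits) with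
        | none => acc                         -- ValueError in from_1comp; outside Pre_acDe
        | some n => altLoop table (rest.drop cat) table (acc ++ [(rl, n)])
    | none => if cands'.isEmpty then acc else altLoop table rest cands' acc
  termination_by cs => cs.length
  decreasing_by all_goals (simp [List.length_drop]; try omega)

def acDe_alt (acHTd : List (String × Int)) (CS_layers : List String) : List (List (Int × Int)) :=
  let table := acHTd.map (fun kv => (kv.1.toList, kv.2))
  CS_layers.foldl (fun out CS => out ++ [altLoop table CS.toList table []]) []

-- ===== PRECONDITION & SPEC =====

-- the shortest nonempty prefix of cs that is a key of the table, with its value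
def firstMatch? (d : List (String × Int)) (cs : List Char) : Option (Nat × Int) :=
  (List.range cs.length).findSome? (fun i =>
    ((PySem.Dict.mk d).get? (String.ofList (cs.take (i + 1)))).map (fun v => (i + 1, v)))

-- closed-form shape of a binary digit run Python's int(·, 2) accepts: starts with a digit,
-- only digits and underscores, no trailing underscore, no double underscore
def binDigitsOk (l : List Char) : Bool :=
  (match l.head? with | some c => c == '0' || c == '1' | none => false)
  && l.all (fun c => c == '0' || c == '1' || c == '_')
  && (match l.getLast? with | some c => !(c == '_') | none => false)
  && !(decide (['_', '_'] <:+: l))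

-- int(s, 2) accepts s: strip whitespace, optional sign, optional 0b/0B prefix
-- (one underscore allowed right after it), then a well-shaped digit run
def intOk2 (s : List Char) : Bool :=
  let l := ((s.dropWhile pyWs).reverse.dropWhile pyWs).reverse
  let l1 := match l with | '+' :: t => t | '-' :: t => t | _ => l
  match l1 with
  | '0' :: 'b' :: t => (match t with | '_' :: t2 => binDigitsOk t2 | _ => binDigitsOk t)
  | '0' :: 'B' :: t => (match t with | '_' :: t2 => binDigitsOk t2 | _ => binDigitsOk t)
  | _ => binDigitsOk l1

-- from_1comp returns normally on these additional bits (its complement branch never raises)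
def from1Ok (bits : List Char) : Bool :=
  match bits with
  | [] => true
  | ['0'] => true
  | c :: _ => if c == '0' then true else intOk2 bits

-- a layer is a well-formed stream of at most b codewords: repeatedly cut the shortest matching
-- codeword; enough additional bits must remain and they must be acceptable to from_1comp.
-- Each codeword consumes at least one bit, so b = cs.length makes the bound vacuous.
def okCodes (d : List (String × Int)) : Nat → List Char → Bool
  | 0, _ => true
  | b + 1, cs =>
    match firstMatch? d cs with
    | none => true
    | some (n, v) =>
      let cat := (PySem.Int.mod v 16).toNat
      let rest := cs.drop n
      !(decide (rest.length < cat)) && (cat == 0 || from1Ok (rest.take cat))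
        && okCodes d b (rest.drop cat)

-- Pre_ excludes exactly the inputs where the Python raises: a layer ends inside the additional
-- bits of a codeword (RuntimeError, PEP 479) or the additional bits make int(·, 2) fail (ValueError).
def Pre_acDe (acHTd : List (String × Int)) (CS_layers : List String) : Prop :=
  ∀ CS ∈ CS_layers, okCodes acHTd CS.toList.length CS.toList = true
instance (acHTd : List (String × Int)) (CS_layers : List String) : Decidable (Pre_acDe acHTd CS_layers) := by unfold Pre_acDe; infer_instance

def pvWitness_acDe : (List (String × Int)) × List String := ([("10", 35), ("0", 16)], ["10110", "0110"])

def Spec_acDe (acHTd : List (String × Int)) (CS_layers : List String) (out : List (List (Int × Int))) : Prop := out = acDe_alt acHTd CS_layers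
instance (acHTd : List (String × Int)) (CS_layers : List String) (out : List (List (Int × Int))) : Decidable (Spec_acDe acHTd CS_layers out) := by unfold Spec_acDe; infer_instance

-- ===== CLAIM (what is proved, stated in full; the proofs are below) =====
def Claim_equal_acDe : Prop := ∀ (acHTd : List (String × Int)) (CS_layers : List String), Dom_acDe acHTd CS_layers → Pre_acDe acHTd CS_layers → Spec_acDe acHTd CS_layers (acDe acHTd CS_layers)

-- ===== LEMMAS AND PROOFS =====

-- the candidate list reached from table t after consuming prefix p
def walk : List Char → List (List Char × Int) → List (List Char × Int)
  | [], s => s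
  | c :: p, s => walk p (stepCands c s)

def tableOf (l : List (String × Int)) : List (List Char × Int) :=
  l.map (fun kv => (kv.1.toList, kv.2))

theorem walk_nil_s (p : List Char) : walk p [] = [] := by
  induction p with
  | nil => rfl
  | cons c p ih => simpa [walk, stepCands] using ih

theorem walk_append (a b : List Char) (s : List (List Char × Int)) :
    walk (a ++ b) s = walk b (walk a s) := by
  induction a generalizing s with
  | nil => rfl
  | cons c a ih => simp [walk, ih]

theorem walk_eq_filterMap (p : List Char) (s : List (List Char × Int)) :
    walk p s = s.filterMap (fun tv =>
      if p <+: tv.1 then some (tv.1.drop p.length, tv.2) else none) := by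
  induction p generalizing s with
  | nil => simp [walk]
  | cons c p ih =>
    simp only [walk, stepCands, ih, List.filterMap_filterMap]
    apply List.filterMap_congr
    intro tv _
    rcases tv with ⟨t, v⟩
    cases t with
    | nil => simp
    | cons h t' =>
      by_cases hc : h = c
      · subst hc
        by_cases hp : p <+: t' <;>
          simp [hp, List.cons_prefix_cons, List.length_cons]
      · have hch : ¬ c = h := fun e => hc e.symm
        simp [hc, hch, List.cons_prefix_cons]

theorem firstHit?_walk (l : List (String × Int)) (p : List Char) :
    firstHit? (walk p (tableOf l)) = (PySem.Dict.mk l).get? (String.ofList p) := by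
  induction l with
  | nil => simp [tableOf, walk_nil_s, firstHit?, PySem.Dict.get?]
  | cons kv rest ih =>
    rcases kv with ⟨k, v⟩
    rw [walk_eq_filterMap] at ih ⊢
    rw [PySem.Dict.get?_mk_cons]
    simp only [tableOf, List.map_cons, List.filterMap_cons] at *
    by_cases hk : k.toList = p
    · have hbe : (k == String.ofList p) = true := by
        simp only [beq_iff_eq]; exact String.ofList_eq.mpr hk.symm |>.symm
      rw [hbe]
      simp [hk, firstHit?, List.drop_length]
    · have hbe : (k == String.ofList p) = false := by
        simp only [beq_eq_false_iff_ne, ne_eq]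
        intro he; exact hk (by rw [he]; simp)
      rw [hbe]
      by_cases hpk : p <+: k.toList
      · obtain ⟨sfx, hsfx⟩ := hpk
        have hne : sfx ≠ [] := fun hz => hk (by rw [← hsfx, hz, List.append_nil])
        have hdrop : k.toList.drop p.length = sfx := by rw [← hsfx, List.drop_left]
        rw [if_pos ⟨sfx, hsfx⟩, hdrop]
        simp only [firstHit?, List.find?_cons]
        have hie : sfx.isEmpty = false := by
          cases sfx with
          | nil => exact absurd rfl hne
          | cons a b => rfl
        rw [hie]
        exact ih
      · rw [if_neg hpk]
        exact ih

theorem acDeLoop_dead (l : List (String × Int)) (cs : List Char) :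
    ∀ bs acc, walk bs (tableOf l) = [] →
      acDeLoop (PySem.Dict.mk l) cs bs acc = acc := by
  induction cs with
  | nil => intro bs acc _; simp [acDeLoop]
  | cons c rest ih =>
    intro bs acc hdead
    have hwalk : walk (bs ++ [c]) (tableOf l) = [] := by
      rw [walk_append, hdead]; rfl
    have hget : (PySem.Dict.mk l).get? (String.ofList (bs ++ [c])) = none := by
      rw [← firstHit?_walk, hwalk]; rfl
    rw [acDeLoop, hget]
    exact ih _ _ hwalk

theorem acDeLoop_eq_altLoop (l : List (String × Int)) :
    ∀ n cs, cs.length ≤ n → ∀ bs acc,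
      acDeLoop (PySem.Dict.mk l) cs bs acc = altLoop (tableOf l) cs (walk bs (tableOf l)) acc := by
  intro n
  induction n with
  | zero =>
    intro cs hcs bs acc
    have : cs = [] := List.length_eq_zero_iff.mp (Nat.le_zero.mp hcs)
    subst this; simp [acDeLoop, altLoop]
  | succ n ih =>
    intro cs hcs bs acc
    cases cs with
    | nil => simp [acDeLoop, altLoop]
    | cons c rest =>
      have hlen : rest.length ≤ n := by simpa using hcs
      have hstep : stepCands c (walk bs (tableOf l)) = walk (bs ++ [c]) (tableOf l) := by
        rw [walk_append]; rfl
      rw [acDeLoop, altLoop, hstep, ← firstHit?_walk]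
      cases hfh : firstHit? (walk (bs ++ [c]) (tableOf l)) with
      | none =>
        simp only []
        by_cases hdead : walk (bs ++ [c]) (tableOf l) = []
        · have : (walk (bs ++ [c]) (tableOf l)).isEmpty = true := by simp [hdead]
          rw [this]
          simp only [if_true]
          exact acDeLoop_dead l rest (bs ++ [c]) acc hdead
        · have : (walk (bs ++ [c]) (tableOf l)).isEmpty = false := by
            cases h : walk (bs ++ [c]) (tableOf l) <;> simp_all
          rw [this]
          simp only [Bool.false_eq_true, if_false]
          exact ih rest hlen (bs ++ [c]) acc
      | some v =>
        simp only []
        set cat := (PySem.Int.mod v 16).toNat with hcat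
        by_cases htr : rest.length < cat
        · simp [htr]
        · simp only [htr, if_false]
          have hdlen : (rest.drop cat).length ≤ n := by
            simp [List.length_drop]; omega
          by_cases hab : (rest.take cat).isEmpty
          · simp only [hab, if_true]
            exact ih (rest.drop cat) hdlen [] _
          · have hab' : (rest.take cat).isEmpty = false := by simpa using hab
            simp only [hab', Bool.false_eq_true, if_false]
            cases hfc : from_1comp? (rest.take cat) with
            | none => rfl
            | some m => exact ih (rest.drop cat) hdlen [] _

-- ===== VERDICT (by name: the statement is the Claim_ definition above) =====
theorem acDe_spec : Claim_equal_acDe := by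
  intro acHTd CS_layers _ _
  unfold Spec_acDe acDe acDe_alt
  rw [PySem.List.foldl_append_singleton_eq_map, PySem.List.foldl_append_singleton_eq_map]
  simp only [List.nil_append]
  apply List.map_congr_left
  intro CS _
  have := acDeLoop_eq_altLoop acHTd CS.toList.length CS.toList (le_refl _) [] []
  simpa [walk, tableOf] using this
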